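-- pv_equiv track=rewrite | github.com/cgvvxx/PS | programmers/programmers_118667.py | solution
-- ===== SOURCE A (Python) =====
-- from collections import deque
--
-- def solution(queue1, queue2):
--
--     q1, q2 = deque(queue1), deque(queue2)
--     s1, s2 = sum(queue1), sum(queue2)
--     l = 2 * (len(queue1) + len(queue2))
--
--     cnt = 0
--
--     while True:
--
--         if s1 == s2:
--             return cnt
--         elif s1 > s2:
--             p = q1.popleft()
--             q2.append(p)
--             s1 -= p
--             s2 += p
--         else:
--             p = q2.popleft()
--             q1.append(p)
--             s2 -= p
--             s1 += p
--
--         l -= 1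
--         cnt += 1
--
--         if l == 0:
--             return -1
-- ===== SOURCE B (Python) =====
-- def solution(queue1, queue2):
--     n1 = len(queue1)
--     n = n1 + len(queue2)
--     if n == 0:
--         return 0
--     arr = queue1 + queue2
--     P = [0]
--     for x in arr * 3:
--         P.append(P[-1] + x)
--     S = P[n]
--     left, right = 0, n1
--     while left + (right - n1) < 2 * n:
--         w = P[right] - P[left]
--         if 2 * w == S:
--             return left + right - n1
--         if 2 * w > S:
--             left += 1
--         else:
--             right += 1
--     return -1
-- ===== Notes on version B (the rewrite author's own statement) =====
-- stated objective: alternative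
-- what changed: Replaces A's simulation state (two live deques mutated every move plus two incrementally-updated running sums) by a prefix-sum array of the tripled concatenated list computed once up front and two bare pointers; each candidate split's sum is obtained by a single subtraction of two precomputed prefix sums, so no list is ever mutated and no running sums are carried.
-- outside the precondition, e.g. on solution([-1], [-1]): A returns 0, B returns 0
import Mathlib
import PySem

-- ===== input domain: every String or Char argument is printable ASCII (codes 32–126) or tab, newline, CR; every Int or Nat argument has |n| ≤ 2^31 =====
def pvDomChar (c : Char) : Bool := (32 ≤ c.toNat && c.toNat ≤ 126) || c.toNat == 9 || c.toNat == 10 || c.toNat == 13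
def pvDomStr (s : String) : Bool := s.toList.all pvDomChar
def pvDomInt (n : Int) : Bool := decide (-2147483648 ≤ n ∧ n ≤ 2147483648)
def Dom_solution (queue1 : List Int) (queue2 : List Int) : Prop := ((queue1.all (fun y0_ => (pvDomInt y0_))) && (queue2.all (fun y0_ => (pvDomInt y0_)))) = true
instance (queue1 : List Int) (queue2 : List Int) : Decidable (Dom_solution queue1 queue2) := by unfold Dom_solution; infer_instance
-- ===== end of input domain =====

-- B replaces A's deque simulation (two live deques, two running sums updated every move) by a
-- precomputed prefix-sum array of the tripled concatenated list and two pointers; each window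
-- sum is a single subtraction of prefix sums (objective: alternative; same asymptotic cost).

-- ===== PORT A =====
-- A's while-True loop: l (= remaining allowed moves) strictly decreases each iteration, so it
-- is ported as structural recursion on l.  A popleft from an empty deque is Python's
-- IndexError, modelled as `none` (those inputs are excluded by Pre_solution below).
def aLoop : Nat → List Int → List Int → Int → Int → Int → Option Int
  | 0, _, _, s1, s2, cnt => if s1 = s2 then some cnt else none
  | l+1, q1, q2, s1, s2, cnt =>
    if s1 = s2 then some cnt
    else if s1 > s2 then
      match q1 with
      | [] => none          -- IndexError
      | p :: t => if l = 0 then some (-1) else aLoop l t (q2 ++ [p]) (s1 - p) (s2 + p) (cnt + 1)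
    else
      match q2 with
      | [] => none          -- IndexError
      | p :: t => if l = 0 then some (-1) else aLoop l (q1 ++ [p]) t (s1 + p) (s2 - p) (cnt + 1)

def solution (queue1 : List Int) (queue2 : List Int) : Int :=
  (aLoop (2 * (queue1.length + queue2.length)) queue1 queue2 queue1.sum queue2.sum 0).getD 0

-- ===== PORT B =====
-- Source B's `P = [0]; for x in arr*3: P.append(P[-1]+x)`: the carried `last` is P[-1], each step
-- appends `last + x`.
def buildP : List Int → Int → List Int
  | [], _ => []
  | x :: t, last => (last + x) :: buildP t (last + x)

-- Source B's `while left + (right - n1) < 2*n` loop: fuel = 2*n - (left + (right - n1)), which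
-- decreases by 1 each iteration (one pointer advances).  `P[right]`/`P[left]` are always in
-- range in Source B (right ≤ n1 + 2n - 1 < 3n + 1 = len(P)), so getD is exact for its indexing.
def bLoop (P : List Int) (S : Int) (n1 : Nat) : Nat → Nat → Nat → Int
  | 0, _, _ => -1
  | k+1, left, right =>
    let w := P.getD right 0 - P.getD left 0
    if 2 * w = S then (left : Int) + (right : Int) - (n1 : Int)
    else if 2 * w > S then bLoop P S n1 k (left + 1) right
    else bLoop P S n1 k left (right + 1)

def solution_alt (queue1 : List Int) (queue2 : List Int) : Int :=
  let n1 := queue1.length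
  let n := n1 + queue2.length
  if n = 0 then 0
  else
    let arr := queue1 ++ queue2
    let P := (0 : Int) :: buildP (arr ++ arr ++ arr) 0
    let S := P.getD n 0
    bLoop P S n1 (2 * n) 0 n1

-- ===== PRECONDITION & SPEC =====
-- Pre_ excludes inputs whose total sum is negative: only on those can A pop an empty deque
-- and raise IndexError (an empty deque has sum 0, so a pop from it needs the other sum < 0).
def Pre_solution (queue1 : List Int) (queue2 : List Int) : Prop :=
  0 ≤ queue1.sum + queue2.sum
instance (queue1 : List Int) (queue2 : List Int) : Decidable (Pre_solution queue1 queue2) := by unfold Pre_solution; infer_instance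

def pvWitness_solution : List Int × List Int := ([1, 2], [3])

def Spec_solution (queue1 : List Int) (queue2 : List Int) (out : Int) : Prop := out = solution_alt queue1 queue2
instance (queue1 : List Int) (queue2 : List Int) (out : Int) : Decidable (Spec_solution queue1 queue2 out) := by unfold Spec_solution; infer_instance

-- ===== CLAIM (what is proved, stated in full; the proofs are below) =====
def Claim_equal_solution : Prop := ∀ (queue1 : List Int) (queue2 : List Int), Dom_solution queue1 queue2 → Pre_solution queue1 queue2 → Spec_solution queue1 queue2 (solution queue1 queue2)

-- ===== LEMMAS AND PROOFS =====

-- circular window of length k starting at index i in arr (|arr| = n)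
def circ (arr : List Int) (n i k : Nat) : List Int :=
  (List.range k).map (fun j => arr.getD ((i + j) % n) 0)

theorem circ_zero (arr : List Int) (n i : Nat) : circ arr n i 0 = [] := rfl

theorem circ_succ (arr : List Int) (n i k : Nat) :
    circ arr n i (k + 1) = arr.getD (i % n) 0 :: circ arr n (i + 1) k := by
  simp only [circ, List.range_succ_eq_map, List.map_cons, List.map_map]
  refine congrArg₂ List.cons (by norm_num) ?_
  refine List.map_congr_left ?_
  intro j hj
  have h : i + (j + 1) = i + 1 + j := by omega
  simp [Nat.succ_eq_add_one, h]

theorem circ_snoc (arr : List Int) (n i k : Nat) :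
    circ arr n i (k + 1) = circ arr n i k ++ [arr.getD ((i + k) % n) 0] := by
  simp [circ, List.range_succ]

theorem circ_init (arr : List Int) (i k : Nat) (h : i + k ≤ arr.length) :
    circ arr arr.length i k = (arr.drop i).take k := by
  apply List.ext_getElem
  · simp [circ]; omega
  · intro j hj hj'
    simp only [circ] at hj ⊢
    simp only [List.getElem_map, List.getElem_range]
    have hjk : j < k := by simpa using hj
    have h1 : (i + j) % arr.length = i + j := Nat.mod_eq_of_lt (by omega)
    rw [h1, List.getElem_take, List.getElem_drop]
    rw [List.getD_eq_getElem _ _ (by omega)]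

-- element m of the tripled list is element m % n of arr
theorem trip_getD (arr : List Int) (m : Nat) (h : m < 3 * arr.length) :
    (arr ++ arr ++ arr).getD m 0 = arr.getD (m % arr.length) 0 := by
  have hn0 : 0 < arr.length := by omega
  rcases Nat.lt_or_ge m arr.length with h1 | h1
  · rw [Nat.mod_eq_of_lt h1]
    rw [List.getD_append _ _ _ _ (by simp; omega)]
    rw [List.getD_append _ _ _ _ h1]
  · rcases Nat.lt_or_ge m (2 * arr.length) with h2 | h2
    · have hm : m % arr.length = m - arr.length := by
        conv_lhs => rw [show m = (m - arr.length) + arr.length * 1 by omega]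
        rw [Nat.add_mul_mod_self_left]
        exact Nat.mod_eq_of_lt (by omega)
      rw [List.getD_append _ _ _ _ (by simp; omega)]
      rw [List.getD_append_right _ _ _ _ h1, hm]
    · have hm : m % arr.length = m - 2 * arr.length := by
        conv_lhs => rw [show m = (m - 2 * arr.length) + arr.length * 2 by omega]
        rw [Nat.add_mul_mod_self_left]
        exact Nat.mod_eq_of_lt (by omega)
      rw [List.getD_append_right _ _ _ _ (by simp; omega), hm]
      congr 1
      simp only [List.length_append]
      omega

-- a circular window that fits inside the tripled list is a plain segment of it
theorem circ_eq_seg (arr : List Int) (n i k : Nat) (hn : n = arr.length)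
    (h : i + k ≤ 3 * n) :
    circ arr n i k = ((arr ++ arr ++ arr).drop i).take k := by
  apply List.ext_getElem
  · simp [circ, hn]; omega
  · intro j hj hj'
    simp only [circ] at hj ⊢
    simp only [List.getElem_map, List.getElem_range]
    have hjk : j < k := by simpa using hj
    rw [List.getElem_take, List.getElem_drop]
    rw [← List.getD_eq_getElem _ 0 (by simp [← hn]; omega)]
    rw [trip_getD arr (i + j) (by omega), hn]

-- P.getD i 0 is the sum of the first i elements
theorem buildP_getD : ∀ (xs : List Int) (a : Int) (i : Nat), i < xs.length →
    (buildP xs a).getD i 0 = a + (xs.take (i + 1)).sum := by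
  intro xs
  induction xs with
  | nil => intro a i h; simp at h
  | cons x t ih =>
    intro a i h
    cases i with
    | zero => simp [buildP]
    | succ j =>
      have := ih (a + x) j (by simpa using h)
      simp only [buildP, List.getD_cons_succ, this, List.take_succ_cons, List.sum_cons]
      ring

theorem P_getD (xs : List Int) (i : Nat) (h : i ≤ xs.length) :
    ((0 : Int) :: buildP xs 0).getD i 0 = (xs.take i).sum := by
  cases i with
  | zero => simp
  | succ j =>
    rw [List.getD_cons_succ, buildP_getD xs 0 j (by omega)]
    simp

-- the prefix-sum difference is the circular-window sum
theorem w_eq (arr : List Int) (n : Nat) (hn : n = arr.length) (left right : Nat)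
    (h1 : left ≤ right) (h2 : right ≤ 3 * n) :
    ((0 : Int) :: buildP (arr ++ arr ++ arr) 0).getD right 0
      - ((0 : Int) :: buildP (arr ++ arr ++ arr) 0).getD left 0
      = (circ arr n left (right - left)).sum := by
  have hlen : (arr ++ arr ++ arr).length = 3 * n := by simp [← hn]; omega
  have hsplit : ((arr ++ arr ++ arr).take right).sum
      = ((arr ++ arr ++ arr).take left).sum
        + (((arr ++ arr ++ arr).drop left).take (right - left)).sum := by
    conv_lhs => rw [show right = left + (right - left) by omega]
    rw [List.take_add, List.sum_append]
  rw [P_getD _ right (by omega), P_getD _ left (by omega), hsplit,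
    circ_eq_seg arr n left (right - left) hn (by omega)]
  ring

theorem S_eq (arr : List Int) :
    ((0 : Int) :: buildP (arr ++ arr ++ arr) 0).getD arr.length 0 = arr.sum := by
  rw [P_getD _ arr.length (by simp only [List.length_append]; omega)]
  rw [List.append_assoc, List.take_left]

-- one-step unfolding lemmas for the two loops
theorem aLoop_done (l : Nat) (q1 q2 : List Int) (s1 s2 cnt : Int) (h : s1 = s2) :
    aLoop (l + 1) q1 q2 s1 s2 cnt = some cnt := by simp [aLoop, h]

theorem aLoop_step_gt (l : Nat) (p : Int) (t q2 : List Int) (s1 s2 cnt : Int)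
    (h1 : ¬ s1 = s2) (h2 : s1 > s2) :
    aLoop (l + 1) (p :: t) q2 s1 s2 cnt
      = if l = 0 then some (-1) else aLoop l t (q2 ++ [p]) (s1 - p) (s2 + p) (cnt + 1) := by
  simp [aLoop, h1, h2]

theorem aLoop_step_lt (l : Nat) (p : Int) (q1 t : List Int) (s1 s2 cnt : Int)
    (h1 : ¬ s1 = s2) (h2 : ¬ s1 > s2) :
    aLoop (l + 1) q1 (p :: t) s1 s2 cnt
      = if l = 0 then some (-1) else aLoop l (q1 ++ [p]) t (s1 + p) (s2 - p) (cnt + 1) := by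
  simp [aLoop, h1, h2]

theorem bLoop_done (P : List Int) (S : Int) (n1 k left right : Nat)
    (h : 2 * (P.getD right 0 - P.getD left 0) = S) :
    bLoop P S n1 (k + 1) left right = (left : Int) + (right : Int) - (n1 : Int) := by
  simp only [bLoop]
  rw [if_pos h]

theorem bLoop_step_gt (P : List Int) (S : Int) (n1 k left right : Nat)
    (h1 : ¬ 2 * (P.getD right 0 - P.getD left 0) = S)
    (h2 : 2 * (P.getD right 0 - P.getD left 0) > S) :
    bLoop P S n1 (k + 1) left right = bLoop P S n1 k (left + 1) right := by
  simp only [bLoop]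
  rw [if_neg h1, if_pos h2]

theorem bLoop_step_lt (P : List Int) (S : Int) (n1 k left right : Nat)
    (h1 : ¬ 2 * (P.getD right 0 - P.getD left 0) = S)
    (h2 : ¬ 2 * (P.getD right 0 - P.getD left 0) > S) :
    bLoop P S n1 (k + 1) left right = bLoop P S n1 k left (right + 1) := by
  simp only [bLoop]
  rw [if_neg h1, if_neg h2]

-- main invariant lemma: A's deque state is the circular window [left, right) of arr together
-- with its complement, A's running sums are the two window sums (= B's prefix-sum
-- differences), and A's move counter is left + right - n1; nonnegative total keeps the
-- popped-from window nonempty, so A never hits an empty deque.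
theorem loop_eq (arr : List Int) (n : Nat) (hn : n = arr.length) (n1 : Nat)
    (hpos : 0 ≤ arr.sum) :
    ∀ (l left right : Nat),
      left ≤ right → right ≤ left + n → left + l < 2 * n →
      (circ arr n left (right - left)).sum + (circ arr n right (left + n - right)).sum
        = arr.sum →
      aLoop (l + 1) (circ arr n left (right - left)) (circ arr n right (left + n - right))
          (circ arr n left (right - left)).sum (circ arr n right (left + n - right)).sum
          ((left : Int) + (right : Int) - (n1 : Int))
        = some (bLoop ((0 : Int) :: buildP (arr ++ arr ++ arr) 0) arr.sum n1 (l + 1)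
            left right) := by
  intro l
  induction l with
  | zero =>
    intro left right hlr hrn hfuel hS
    set q1 := circ arr n left (right - left) with hq1
    set q2 := circ arr n right (left + n - right) with hq2
    have hw1 : ((0 : Int) :: buildP (arr ++ arr ++ arr) 0).getD right 0
        - ((0 : Int) :: buildP (arr ++ arr ++ arr) 0).getD left 0 = q1.sum :=
      w_eq arr n hn left right hlr (by omega)
    by_cases heq : q1.sum = q2.sum
    · rw [aLoop_done _ _ _ _ _ _ heq,
        bLoop_done _ _ _ _ _ _ (by rw [hw1]; omega)]
    · by_cases hgt : q1.sum > q2.sum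
      · have hne : right - left ≠ 0 := by
          intro h0
          rw [hq1, h0, circ_zero] at hgt hS
          simp at hgt hS; omega
        obtain ⟨m, hm⟩ : ∃ m, right - left = m + 1 := ⟨right - left - 1, by omega⟩
        have hq1' : q1 = arr.getD (left % n) 0 :: circ arr n (left + 1) m := by
          rw [hq1, hm, circ_succ]
        rw [bLoop_step_gt _ _ _ _ _ _ (by rw [hw1]; omega) (by rw [hw1]; omega)]
        rw [hq1',
          aLoop_step_gt _ _ _ _ _ _ _ (by rw [← hq1']; exact heq) (by rw [← hq1']; exact hgt),
          if_pos rfl]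
        simp [bLoop]
      · have hne : left + n - right ≠ 0 := by
          intro h0
          rw [hq2, h0, circ_zero] at heq hgt hS
          simp at heq hgt hS; omega
        obtain ⟨m, hm⟩ : ∃ m, left + n - right = m + 1 := ⟨left + n - right - 1, by omega⟩
        have hq2' : q2 = arr.getD (right % n) 0 :: circ arr n (right + 1) m := by
          rw [hq2, hm, circ_succ]
        rw [bLoop_step_lt _ _ _ _ _ _ (by rw [hw1]; omega) (by rw [hw1]; omega)]
        rw [hq2',
          aLoop_step_lt _ _ _ _ _ _ _ (by rw [← hq2']; exact heq) (by rw [← hq2']; exact hgt),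
          if_pos rfl]
        simp [bLoop]
  | succ l ih =>
    intro left right hlr hrn hfuel hS
    set q1 := circ arr n left (right - left) with hq1
    set q2 := circ arr n right (left + n - right) with hq2
    have hw1 : ((0 : Int) :: buildP (arr ++ arr ++ arr) 0).getD right 0
        - ((0 : Int) :: buildP (arr ++ arr ++ arr) 0).getD left 0 = q1.sum :=
      w_eq arr n hn left right hlr (by omega)
    by_cases heq : q1.sum = q2.sum
    · rw [aLoop_done _ _ _ _ _ _ heq,
        bLoop_done _ _ _ _ _ _ (by rw [hw1]; omega)]
    · by_cases hgt : q1.sum > q2.sum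
      · have hne : right - left ≠ 0 := by
          intro h0
          rw [hq1, h0, circ_zero] at hgt hS
          simp at hgt hS; omega
        obtain ⟨m, hm⟩ : ∃ m, right - left = m + 1 := ⟨right - left - 1, by omega⟩
        have hq1' : q1 = arr.getD (left % n) 0 :: circ arr n (left + 1) m := by
          rw [hq1, hm, circ_succ]
        have happ : q2 ++ [arr.getD (left % n) 0] = circ arr n right ((left + 1) + n - right) := by
          have h1 : (left + 1) + n - right = (left + n - right) + 1 := by omega
          rw [h1, circ_snoc, hq2]
          congr 2
          have h2 : right + (left + n - right) = left + n := by omega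
          rw [h2, Nat.add_mod_right]
        have hm' : m = right - (left + 1) := by omega
        have hsum1 : (arr.getD (left % n) 0 :: circ arr n (left + 1) m).sum - arr.getD (left % n) 0
            = (circ arr n (left + 1) (right - (left + 1))).sum := by
          rw [← hm']; simp only [List.sum_cons]; omega
        have hsum2 : q2.sum + arr.getD (left % n) 0
            = (circ arr n right ((left + 1) + n - right)).sum := by
          rw [← happ]; simp only [List.sum_append, List.sum_cons, List.sum_nil]; omega
        rw [bLoop_step_gt _ _ _ _ _ _ (by rw [hw1]; omega) (by rw [hw1]; omega)]
        rw [hq1'] at hS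
        rw [hq1',
          aLoop_step_gt _ _ _ _ _ _ _ (by rw [← hq1']; exact heq) (by rw [← hq1']; exact hgt),
          if_neg (Nat.succ_ne_zero l), happ, hsum1, hsum2, hm']
        have hcnt : ((left : Int) + (right : Int) - (n1 : Int)) + 1
            = ((left + 1 : Nat) : Int) + (right : Int) - (n1 : Int) := by push_cast; ring
        rw [hcnt]
        exact ih (left + 1) right (by omega) (by omega) (by omega)
          (by rw [← hsum1, ← hsum2]; simp only [List.sum_cons] at hS ⊢; omega)
      · have hne : left + n - right ≠ 0 := by
          intro h0
          rw [hq2, h0, circ_zero] at heq hgt hS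
          simp at heq hgt hS
          omega
        obtain ⟨m, hm⟩ : ∃ m, left + n - right = m + 1 := ⟨left + n - right - 1, by omega⟩
        have hq2' : q2 = arr.getD (right % n) 0 :: circ arr n (right + 1) m := by
          rw [hq2, hm, circ_succ]
        have happ : q1 ++ [arr.getD (right % n) 0] = circ arr n left ((right + 1) - left) := by
          have h1 : (right + 1) - left = (right - left) + 1 := by omega
          rw [h1, circ_snoc, hq1]
          congr 2
          have h2 : left + (right - left) = right := by omega
          rw [h2]
        have hm' : m = left + n - (right + 1) := by omega
        have hsum2 : (arr.getD (right % n) 0 :: circ arr n (right + 1) m).sum - arr.getD (right % n) 0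
            = (circ arr n (right + 1) (left + n - (right + 1))).sum := by
          rw [← hm']; simp only [List.sum_cons]; omega
        have hsum1 : q1.sum + arr.getD (right % n) 0
            = (circ arr n left ((right + 1) - left)).sum := by
          rw [← happ]; simp only [List.sum_append, List.sum_cons, List.sum_nil]; omega
        rw [bLoop_step_lt _ _ _ _ _ _ (by rw [hw1]; omega) (by rw [hw1]; omega)]
        rw [hq2'] at hS
        rw [hq2',
          aLoop_step_lt _ _ _ _ _ _ _ (by rw [← hq2']; exact heq) (by rw [← hq2']; exact hgt),
          if_neg (Nat.succ_ne_zero l), happ, hsum1, hsum2, hm']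
        have hcnt : ((left : Int) + (right : Int) - (n1 : Int)) + 1
            = ((left : Int) + ((right + 1 : Nat) : Int) - (n1 : Int)) := by push_cast; ring
        rw [hcnt]
        exact ih left (right + 1) (by omega) (by omega) (by omega)
          (by rw [← hsum1, ← hsum2]; simp only [List.sum_cons] at hS ⊢; omega)

theorem circ_init1 (q1 q2 : List Int) :
    circ (q1 ++ q2) (q1 ++ q2).length 0 q1.length = q1 := by
  rw [circ_init _ _ _ (by simp)]
  simp

theorem circ_init2 (q1 q2 : List Int) :
    circ (q1 ++ q2) (q1 ++ q2).length q1.length ((q1 ++ q2).length - q1.length) = q2 := by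
  rw [circ_init _ _ _ (by simp)]
  simp

-- ===== VERDICT (by name: the statement is the Claim_ definition above) =====
theorem solution_spec : Claim_equal_solution := by
  intro queue1 queue2 _ hpre
  unfold Spec_solution solution solution_alt
  rcases Nat.eq_zero_or_pos (queue1 ++ queue2).length with h0 | hpos
  · have h1 : queue1 = [] := by cases queue1 <;> simp_all
    have h2 : queue2 = [] := by cases queue2 <;> simp_all
    subst h1; subst h2
    simp [aLoop]
  · have hlen : 2 * (queue1.length + queue2.length)
        = (2 * (queue1 ++ queue2).length - 1) + 1 := by
      simp only [List.length_append] at hpos ⊢; omega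
    have h1 := circ_init1 queue1 queue2
    have h2 := circ_init2 queue1 queue2
    have hposS : 0 ≤ (queue1 ++ queue2).sum := by simpa using hpre
    have key := loop_eq (queue1 ++ queue2) (queue1 ++ queue2).length rfl queue1.length hposS
      (2 * (queue1 ++ queue2).length - 1) 0 queue1.length
      (by simp) (by omega) (by omega)
      (by rw [Nat.sub_zero, Nat.zero_add, h1, h2]; simp)
    rw [Nat.sub_zero, Nat.zero_add, h1, h2] at key
    have hcnt0 : ((0 : Nat) : Int) + (queue1.length : Int) - (queue1.length : Int) = 0 := by
      push_cast; ring
    rw [hcnt0] at key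
    rw [hlen, key]
    simp only [Option.getD_some]
    rw [if_neg (by simp only [List.length_append] at hpos; omega :
      ¬ queue1.length + queue2.length = 0)]
    have hSget : ((0 : Int) :: buildP ((queue1 ++ queue2) ++ (queue1 ++ queue2)
        ++ (queue1 ++ queue2)) 0).getD (queue1.length + queue2.length) 0
        = (queue1 ++ queue2).sum := by
      rw [show queue1.length + queue2.length = (queue1 ++ queue2).length by simp, S_eq]
    rw [hSget]
    rw [show 2 * (queue1 ++ queue2).length - 1 + 1 = 2 * (queue1.length + queue2.length) by
      simp only [List.length_append] at hpos ⊢; omega]
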